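-- pv_equiv track=rewrite | github.com/clee421/advent-of-code | 2023/day13/run.py | get_horizontal_split
-- ===== SOURCE A (Python) =====
-- from typing import Dict, List, Tuple, Set
--
-- def validate_horizontal_split(entry: Tuple[int], pattern: List[str]) -> bool:
--     if abs(entry[0] - entry[1]) > 1:
--         return False
--
--     # same BS as above
--     # pattern_len = len(pattern)
--     # required_matches = int(pattern_len / 2)
--     # for i in range(required_matches):
--     #     j1, j2 = entry[0] - i, (entry[1] + i) % pattern_len
--     #     if pattern[j1] != pattern[j2]:
--     #         return False
--
--     j1, j2 = entry[0], entry[1]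
--     while j1 >= 0 and j2 < len(pattern):
--         if pattern[j1] != pattern[j2]:
--             return False
--         j1 -= 1
--         j2 += 1
--
--     return True
--
-- def get_horizontal_split(pattern: List[str]) -> int:
--     pairs = []
--     pattern_len = len(pattern)
--     for row_i in range(pattern_len):
--         for row_j in range(row_i + 1, pattern_len):
--             if pattern[row_i] == pattern[row_j]:
--                 pairs.append((row_i, row_j))
--                 break
--
--     for pair in pairs:
--         if validate_horizontal_split(pair, pattern):
--             return pair[1]
--
--     return -1
-- ===== SOURCE B (Python) =====
-- def get_horizontal_split(pattern):
--     n = len(pattern)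
--     for k in range(1, n):
--         if all(pattern[k - 1 - d] == pattern[k + d] for d in range(min(k, n - k))):
--             return k
--     return -1
-- ===== Notes on version B (the rewrite author's own statement) =====
-- stated objective: faster
-- what changed: B drops A's quadratic pair-collection pass (for each row, scan all later rows for the first duplicate) and instead directly scans the n-1 adjacent-row boundaries, checking reflection symmetry at each and returning the first valid one.
import Mathlib
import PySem

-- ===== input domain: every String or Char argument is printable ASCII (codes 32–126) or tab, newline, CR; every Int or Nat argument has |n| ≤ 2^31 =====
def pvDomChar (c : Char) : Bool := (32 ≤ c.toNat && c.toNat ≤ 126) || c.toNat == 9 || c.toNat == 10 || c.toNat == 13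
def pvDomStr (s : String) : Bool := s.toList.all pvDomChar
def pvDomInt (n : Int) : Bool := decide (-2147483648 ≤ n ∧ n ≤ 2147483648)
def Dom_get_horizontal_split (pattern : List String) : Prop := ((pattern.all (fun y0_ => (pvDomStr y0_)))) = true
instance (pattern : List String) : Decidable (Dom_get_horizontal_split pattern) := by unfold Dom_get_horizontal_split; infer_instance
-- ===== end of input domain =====

-- B replaces A's quadratic pair-collection pass by a direct scan of the n-1 adjacent-row
-- boundaries, checking reflection symmetry at each; same return value on every input.

-- ===== PORT A =====
-- the 'while j1 >= 0 and j2 < len(pattern)' loop of validate_horizontal_split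
def pvValLoop (pattern : List String) (j1 j2 : Int) : Bool :=
  if h : 0 ≤ j1 ∧ j2 < (pattern.length : Int) then
    if PySem.List.pyGet? pattern j1 ≠ PySem.List.pyGet? pattern j2 then false
    else pvValLoop pattern (j1 - 1) (j2 + 1)
  else true
termination_by (j1 + 1).toNat
decreasing_by omega

def validate_horizontal_split (entry : Int × Int) (pattern : List String) : Bool :=
  if (entry.1 - entry.2).natAbs > 1 then false
  else pvValLoop pattern entry.1 entry.2

-- the inner 'for row_j in range(row_i+1, n): … break' loop: appends at most one pair
def pvInnerLoop (pattern : List String) (row_i : Int) : List Int → List (Int × Int)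
  | [] => []
  | j :: rest =>
    if PySem.List.pyGet? pattern row_i = PySem.List.pyGet? pattern j then [(row_i, j)]
    else pvInnerLoop pattern row_i rest

-- the 'for pair in pairs: if validate(...): return pair[1]' loop
def pvSearch (pattern : List String) : List (Int × Int) → Int
  | [] => -1
  | p :: rest => if validate_horizontal_split p pattern then p.2 else pvSearch pattern rest

def get_horizontal_split (pattern : List String) : Int :=
  let n : Int := pattern.length
  let pairs := (PySem.List.pyRange 0 n 1).foldl
    (fun acc i => acc ++ pvInnerLoop pattern i (PySem.List.pyRange (i + 1) n 1)) []
  pvSearch pattern pairs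

-- ===== PORT B =====
-- 'all(pattern[k-1-d] == pattern[k+d] for d in range(min(k, n-k)))'; both indices are
-- in range for every d < min k (n-k), so getD is exact there
def pvCheck (pattern : List String) (k : Nat) : Bool :=
  (List.range (min k (pattern.length - k))).all
    (fun d => pattern.getD (k - 1 - d) "" == pattern.getD (k + d) "")

def get_horizontal_split_alt (pattern : List String) : Int :=
  let n := pattern.length
  match (List.range' 1 (n - 1)).find? (fun k => pvCheck pattern k) with
  | some k => (k : Int)
  | none => -1

-- ===== PRECONDITION & SPEC =====
def Spec_get_horizontal_split (pattern : List String) (out : Int) : Prop := out = get_horizontal_split_alt pattern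
instance (pattern : List String) (out : Int) : Decidable (Spec_get_horizontal_split pattern out) := by unfold Spec_get_horizontal_split; infer_instance

-- ===== CLAIM (what is proved, stated in full; the proofs are below) =====
def Claim_equal_get_horizontal_split : Prop := ∀ (pattern : List String), Dom_get_horizontal_split pattern → Spec_get_horizontal_split pattern (get_horizontal_split pattern)

-- ===== LEMMAS AND PROOFS =====

-- pvSearch is a first-find over the pair list
theorem pvSearch_eq_find (pattern : List String) (l : List (Int × Int)) :
    pvSearch pattern l =
      match l.find? (fun p => validate_horizontal_split p pattern) with
      | some p => p.2
      | none => -1 := by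
  induction l with
  | nil => rfl
  | cons p rest ih =>
    simp only [pvSearch, List.find?]
    by_cases h : validate_horizontal_split p pattern = true
    · simp [h]
    · simp [h, ih]

-- the inner loop returns the first matching pair, if any
theorem pvInnerLoop_eq_find (pattern : List String) (i : Int) (js : List Int) :
    pvInnerLoop pattern i js =
      match js.find? (fun j => PySem.List.pyGet? pattern i == PySem.List.pyGet? pattern j) with
      | some j => [(i, j)]
      | none => [] := by
  induction js with
  | nil => rfl
  | cons j rest ih =>
    simp only [pvInnerLoop, List.find?]
    by_cases h : PySem.List.pyGet? pattern i = PySem.List.pyGet? pattern j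
    · simp [h]
    · have hb : (PySem.List.pyGet? pattern i == PySem.List.pyGet? pattern j) = false := by
        simpa using h
      simp only [hb, if_neg h, ih]

-- the while loop of validate, started at boundary k shifted by d, computes the tail of B's check
theorem pvValLoop_eq_all (pattern : List String) (k : Nat)
    (hkn : k ≤ pattern.length) : ∀ (d : Nat),
    pvValLoop pattern ((k : Int) - 1 - d) ((k : Int) + d) =
      (List.range' d (min k (pattern.length - k) - d)).all
        (fun e => pattern.getD (k - 1 - e) "" == pattern.getD (k + e) "") := by
  suffices h : ∀ (c d : Nat), min k (pattern.length - k) - d = c →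
      pvValLoop pattern ((k : Int) - 1 - d) ((k : Int) + d) =
      (List.range' d (min k (pattern.length - k) - d)).all
        (fun e => pattern.getD (k - 1 - e) "" == pattern.getD (k + e) "") by
    intro d; exact h _ d rfl
  intro c
  induction c with
  | zero =>
    intro d hd
    rw [hd, pvValLoop, dif_neg (by omega)]
    simp
  | succ c ih =>
    intro d hd
    rw [pvValLoop, dif_pos (by omega)]
    have e1 : (k : Int) - 1 - d = ((k - 1 - d : Nat) : Int) := by omega
    have e2 : (k : Int) + d = ((k + d : Nat) : Int) := by omega
    have h1 : PySem.List.pyGet? pattern ((k : Int) - 1 - d) = some (pattern.getD (k - 1 - d) "") := by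
      rw [e1, PySem.List.pyGet?_natCast, List.getD_eq_getElem?_getD,
        List.getElem?_eq_getElem (by omega)]
      rfl
    have h2 : PySem.List.pyGet? pattern ((k : Int) + d) = some (pattern.getD (k + d) "") := by
      rw [e2, PySem.List.pyGet?_natCast, List.getD_eq_getElem?_getD,
        List.getElem?_eq_getElem (by omega)]
      rfl
    rw [hd, List.range'_succ, List.all_cons]
    simp only [List.getD_eq_getElem?_getD] at h1 h2 ⊢
    by_cases heq : pattern[k - 1 - d]?.getD "" = pattern[k + d]?.getD ""
    · rw [if_neg (by simp [h1, h2, heq])]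
      have e3 : (k : Int) - 1 - d - 1 = (k : Int) - 1 - (d + 1 : Nat) := by push_cast; ring
      have e4 : (k : Int) + d + 1 = (k : Int) + (d + 1 : Nat) := by push_cast; ring
      rw [e3, e4, ih (d + 1) (by omega)]
      have hc : min k (pattern.length - k) - (d + 1) = c := by omega
      rw [hc]
      simp only [List.getD_eq_getElem?_getD]
      simp [heq]
    · rw [if_pos (by simp [h1, h2, heq])]
      simp [heq]

theorem validate_eq_check (pattern : List String) (k : Nat)
    (hkn : k ≤ pattern.length) :
    validate_horizontal_split ((k : Int) - 1, (k : Int)) pattern = pvCheck pattern k := by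
  unfold validate_horizontal_split
  rw [if_neg (by omega)]
  have hv := pvValLoop_eq_all pattern k hkn 0
  norm_num at hv
  unfold pvCheck
  rw [List.range_eq_range']
  simpa using hv

-- validate rejects any non-adjacent pair
theorem validate_far (pattern : List String) (i j : Int) (h : i + 1 < j) :
    validate_horizontal_split (i, j) pattern = false := by
  unfold validate_horizontal_split
  rw [if_pos]
  omega

-- main loop correspondence, from row i upward
theorem pvMain (pattern : List String) : ∀ (c : Nat) (i : Nat), i + c = pattern.length →
    (match ((PySem.List.pyRange (i : Int) (pattern.length : Int) 1).flatMap
        (fun r => pvInnerLoop pattern r (PySem.List.pyRange (r + 1) (pattern.length : Int) 1))).find?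
        (fun p => validate_horizontal_split p pattern) with
      | some p => p.2
      | none => -1) =
    (match (List.range' (i + 1) (pattern.length - 1 - i)).find? (fun k => pvCheck pattern k) with
      | some k => (k : Int)
      | none => -1) := by
  intro c
  induction c with
  | zero =>
    intro i hi
    rw [PySem.List.pyRange_one_eq_nil (by omega)]
    have h0 : pattern.length - 1 - i = 0 := by omega
    rw [h0]
    simp
  | succ c ih =>
    intro i hi
    rw [PySem.List.pyRange_one_cons (by omega : (i : Int) < (pattern.length : Int)),
      List.flatMap_cons, List.find?_append]
    by_cases hlast : i + 1 = pattern.length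
    · rw [PySem.List.pyRange_one_eq_nil (by omega : (pattern.length : Int) ≤ (i : Int) + 1)]
      have h0 : pattern.length - 1 - i = 0 := by omega
      rw [h0]
      simp [pvInnerLoop]
    · -- i + 1 < pattern.length
      rw [PySem.List.pyRange_one_cons (by omega : (i : Int) + 1 < (pattern.length : Int))]
      have hih := ih (i + 1) (by omega)
      push_cast at hih
      have hsplit : pattern.length - 1 - i = (pattern.length - 1 - (i + 1)) + 1 := by omega
      simp only [pvInnerLoop]
      by_cases heq : PySem.List.pyGet? pattern (i : Int) = PySem.List.pyGet? pattern ((i : Int) + 1)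
      · rw [if_pos heq]
        have hval : validate_horizontal_split ((i : Int), (i : Int) + 1) pattern
            = pvCheck pattern (i + 1) := by
          have hvc := validate_eq_check pattern (i + 1) (by omega)
          push_cast at hvc
          simpa using hvc
        by_cases hch : pvCheck pattern (i + 1) = true
        · rw [hsplit, List.range'_succ]
          simp [List.find?, hval, hch]
        · have hch' : pvCheck pattern (i + 1) = false := by simpa using hch
          rw [hsplit, List.range'_succ]
          simp only [List.find?, hval, hch', Option.none_or]
          rw [← PySem.List.pyRange_one_cons (by omega : (i : Int) + 1 < (pattern.length : Int))]
          exact hih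
      · rw [if_neg heq]
        have hnone : (pvInnerLoop pattern (i : Int)
            (PySem.List.pyRange ((i : Int) + 1 + 1) (pattern.length : Int) 1)).find?
            (fun p => validate_horizontal_split p pattern) = none := by
          rw [pvInnerLoop_eq_find]
          cases hfind : (PySem.List.pyRange ((i : Int) + 1 + 1) (pattern.length : Int) 1).find?
              (fun j => PySem.List.pyGet? pattern (i : Int) == PySem.List.pyGet? pattern j) with
          | none => simp
          | some j =>
            have hjmem : j ∈ PySem.List.pyRange ((i : Int) + 1 + 1) (pattern.length : Int) 1 :=
              List.mem_of_find?_eq_some hfind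
            rw [PySem.List.mem_pyRange_one] at hjmem
            simp [List.find?, validate_far pattern (i : Int) j (by omega)]
        have hgd : ¬ (pattern.getD i "" = pattern.getD (i + 1) "") := by
          intro hcontra
          apply heq
          have hc1 : ((i : Int) + 1) = ((i + 1 : Nat) : Int) := by push_cast; ring
          rw [PySem.List.pyGet?_natCast, hc1, PySem.List.pyGet?_natCast,
            List.getElem?_eq_getElem (by omega : i < pattern.length),
            List.getElem?_eq_getElem (by omega : i + 1 < pattern.length)]
          simp only [List.getD_eq_getElem?_getD, List.getElem?_eq_getElem (by omega : i < pattern.length),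
            List.getElem?_eq_getElem (by omega : i + 1 < pattern.length)] at hcontra
          simpa using hcontra
        have hch : pvCheck pattern (i + 1) = false := by
          unfold pvCheck
          rw [List.all_eq_false]
          refine ⟨0, by simp; omega, ?_⟩
          simpa using hgd
        rw [hnone, hsplit, List.range'_succ]
        simp only [Option.none_or, List.find?, hch]
        rw [← PySem.List.pyRange_one_cons (by omega : (i : Int) + 1 < (pattern.length : Int))]
        exact hih

-- ===== VERDICT (by name: the statement is the Claim_ definition above) =====
theorem get_horizontal_split_spec : Claim_equal_get_horizontal_split := by
  intro pattern _
  unfold Spec_get_horizontal_split get_horizontal_split get_horizontal_split_alt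
  simp only [PySem.List.foldl_append_eq_flatMap, List.nil_append, pvSearch_eq_find]
  have := pvMain pattern pattern.length 0 (by omega)
  simpa using this
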